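-- pv_equiv track=rewrite | github.com/PhoenixAthens/Random_Python_Projects | DSA_University/Chapter_3_CodeSnippets.py | powerOfFactor
-- ===== SOURCE A (Python) =====
-- def powerOfFactor(num, fact):
--     if num<fact:
--         return 0
--     if num == fact:
--         return 1
--     elif num % fact == 0:
--         return powerOfFactor(num//fact,fact)+1
--     return 0
-- ===== SOURCE B (Python) =====
-- def powerOfFactor(num, fact):
--     count = 0
--     while num > fact and num % fact == 0:
--         num //= fact
--         count += 1
--     return count + 1 if num == fact else count
-- ===== Notes on version B (the rewrite author's own statement) =====
-- stated objective: simpler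
-- what changed: Replaced the tail recursion with a single accumulator loop that divides out fact while it divides evenly, then adds 1 iff the remainder equals fact; the branch chain and the +1-per-level recursion disappear.
import Mathlib
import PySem

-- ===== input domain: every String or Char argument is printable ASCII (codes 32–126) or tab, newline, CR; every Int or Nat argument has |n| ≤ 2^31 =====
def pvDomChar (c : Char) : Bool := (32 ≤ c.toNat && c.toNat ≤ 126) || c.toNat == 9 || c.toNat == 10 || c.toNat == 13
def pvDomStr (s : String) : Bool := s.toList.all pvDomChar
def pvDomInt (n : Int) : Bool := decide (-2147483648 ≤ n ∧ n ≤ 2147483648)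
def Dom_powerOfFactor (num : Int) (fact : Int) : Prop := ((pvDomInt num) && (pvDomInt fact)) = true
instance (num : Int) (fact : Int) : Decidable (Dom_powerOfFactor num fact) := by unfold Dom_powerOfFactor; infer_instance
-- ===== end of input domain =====

-- B replaces A's tail recursion by an accumulator loop (divide while divisible, then +1 iff the remainder equals fact): simpler, constant stack.


-- ===== PORT A =====
-- A's recursion, with a fuel guard that only makes it total (Pre_ guarantees the fuel is never exhausted)
def powerOfFactorFuelA : Nat → Int → Int → Int
  | 0, _, _ => 0
  | n + 1, num, fact =>
    if num < fact then 0
    else if num == fact then 1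
    else if PySem.Int.mod num fact == 0 then powerOfFactorFuelA n (PySem.Int.floordiv num fact) fact + 1
    else 0

def powerOfFactor (num : Int) (fact : Int) : Int :=
  powerOfFactorFuelA (num.natAbs + 2) num fact

-- ===== PORT B =====
-- B's while-loop with accumulator `count`, fuel-guarded the same way
def powerOfFactorLoopB : Nat → Int → Int → Int → Int
  | 0, count, _, _ => count
  | n + 1, count, num, fact =>
    if num > fact && PySem.Int.mod num fact == 0 then
      powerOfFactorLoopB n (count + 1) (PySem.Int.floordiv num fact) fact
    else if num == fact then count + 1 else count

def powerOfFactor_alt (num : Int) (fact : Int) : Int :=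
  powerOfFactorLoopB (num.natAbs + 2) 0 num fact

-- ===== PRECONDITION & SPEC =====
-- Pre_ excludes exactly the inputs where Python A does not return: fact = 0 with num > 0 (ZeroDivisionError),
-- fact = 1 with num > 1 (RecursionError), and num = 0 with fact < 0 (RecursionError); B raises/diverges there too.
def Pre_powerOfFactor (num : Int) (fact : Int) : Prop :=
  ¬(fact = 0 ∧ num > 0) ∧ ¬(fact = 1 ∧ num > 1) ∧ ¬(fact < 0 ∧ num = 0)
instance (num : Int) (fact : Int) : Decidable (Pre_powerOfFactor num fact) := by unfold Pre_powerOfFactor; infer_instance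
def pvWitness_powerOfFactor : Int × Int := (12, 2)

def Spec_powerOfFactor (num : Int) (fact : Int) (out : Int) : Prop := out = powerOfFactor_alt num fact
instance (num : Int) (fact : Int) (out : Int) : Decidable (Spec_powerOfFactor num fact out) := by unfold Spec_powerOfFactor; infer_instance

-- ===== CLAIM (what is proved, stated in full; the proofs are below) =====
def Claim_equal_powerOfFactor : Prop := ∀ (num : Int) (fact : Int), Dom_powerOfFactor num fact → Pre_powerOfFactor num fact → Spec_powerOfFactor num fact (powerOfFactor num fact)

-- ===== LEMMAS AND PROOFS =====

-- At equal fuel the loop computes count plus A's recursion value; the fuel-exhaustion branches agree (count = count + 0).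
theorem loopB_eq_fuelA (n : Nat) :
    ∀ (count num fact : Int),
      powerOfFactorLoopB n count num fact = count + powerOfFactorFuelA n num fact := by
  induction n with
  | zero => intro count num fact; simp [powerOfFactorLoopB, powerOfFactorFuelA]
  | succ n ih =>
    intro count num fact
    simp only [powerOfFactorLoopB, powerOfFactorFuelA]
    by_cases hlt : num < fact
    · have hgt : ¬ num > fact := by omega
      have hne : (num == fact) = false := by simp; omega
      simp [hlt, hgt, hne]
    · by_cases heq : num = fact
      · have hgt : ¬ num > fact := by omega
        simp [heq]
      · have hgt : num > fact := by omega
        by_cases hdiv : PySem.Int.mod num fact = 0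
        · have hne : (num == fact) = false := by simp [heq]
          simp only [hgt, hdiv, hlt, hne, decide_true, beq_self_eq_true, Bool.and_self,
            if_true, if_false, Bool.false_eq_true, ih]
          ring
        · have hne : (num == fact) = false := by simp [heq]
          simp [hlt, hgt, hdiv, hne]

-- ===== VERDICT (by name: the statement is the Claim_ definition above) =====
theorem powerOfFactor_spec : Claim_equal_powerOfFactor := by
  intro num fact _ _
  show powerOfFactor num fact = powerOfFactor_alt num fact
  simp [powerOfFactor, powerOfFactor_alt, loopB_eq_fuelA]
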